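-- pv_equiv track=rewrite | github.com/lkwinta/wdi | kolos_2022_2.py | odcinki
-- ===== SOURCE A (Python) =====
-- def odcinki(T):
--     for i in range(len(T)):
--         for j in range(len(T)):
--             if i != j:
--                 if T[i][0] > T[j][1] or T[i][1] < T[j][0]:
--                     if (T[i][1] - T[i][0]) + (T[j][1] - T[j][0]) == 2022:
--                         return True
--
--     return False
-- ===== SOURCE B (Python) =====
-- def odcinki(T):
--     # hash by segment length: per length keep the two smallest right endpoints,
--     # then one pass checks each segment for a disjoint partner of complementary length
--     best = {}  # length -> (m1, m2): smallest and second-smallest right endpoint (m2 may be None)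
--     for seg in T:
--         a, b = seg[0], seg[1]
--         L = b - a
--         e = best.get(L)
--         if e is None:
--             best[L] = (b, None)
--         else:
--             m1, m2 = e
--             if b < m1:
--                 best[L] = (b, m1)
--             elif m2 is None or b < m2:
--                 best[L] = (m1, b)
--     for seg in T:
--         a, b = seg[0], seg[1]
--         L = b - a
--         e = best.get(2022 - L)
--         if e is None:
--             continue
--         m1, m2 = e
--         m = m2 if (L == 1011 and b == m1) else m1
--         if m is not None and m < a:
--             return True
--     return False
-- ===== Notes on version B (the rewrite author's own statement) =====
-- stated objective: alternative
-- what changed: Replaces the all-pairs nested scan by a dictionary keyed on segment length that keeps the two smallest right endpoints per length, then decides existence in a single pass using the symmetry of the disjointness condition; worst-case cost drops from quadratic to linear, but A's early exit makes the two comparable on random large inputs, so no speed is claimed.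
-- outside the precondition, e.g. on odcinki([[]]): A returns False, B raises IndexError; on odcinki([[5]]): A returns False, B raises IndexError
import Mathlib
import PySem

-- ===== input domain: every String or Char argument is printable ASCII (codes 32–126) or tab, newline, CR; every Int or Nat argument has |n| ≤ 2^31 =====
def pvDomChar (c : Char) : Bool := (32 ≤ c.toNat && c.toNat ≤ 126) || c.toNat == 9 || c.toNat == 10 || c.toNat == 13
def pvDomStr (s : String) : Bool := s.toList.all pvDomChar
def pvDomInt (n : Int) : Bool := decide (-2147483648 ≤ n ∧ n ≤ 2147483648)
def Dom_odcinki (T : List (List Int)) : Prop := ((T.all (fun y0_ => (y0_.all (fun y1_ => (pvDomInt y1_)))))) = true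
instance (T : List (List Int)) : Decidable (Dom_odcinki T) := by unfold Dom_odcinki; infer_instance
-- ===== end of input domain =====

-- B replaces A's pairwise double scan by a hash keyed on segment length that keeps the two
-- smallest right endpoints per length, then a single existence pass (objective: alternative).

-- shared helpers: seg[0] and seg[1] (exact under Pre_, which guarantees length ≥ 2)
def pvA (s : List Int) : Int := PySem.List.pyGetD s 0 0
def pvB (s : List Int) : Int := PySem.List.pyGetD s 1 0

-- ===== PORT A =====
def odcinki (T : List (List Int)) : Bool :=
  (List.range T.length).any fun i =>
    (List.range T.length).any fun j =>
      decide (i ≠ j) &&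
        ((decide (pvA (T.getD i []) > pvB (T.getD j [])) ||
          decide (pvB (T.getD i []) < pvA (T.getD j []))) &&
         decide ((pvB (T.getD i []) - pvA (T.getD i [])) +
                 (pvB (T.getD j []) - pvA (T.getD j [])) = 2022))

-- ===== PORT B =====
-- first pass: best[L] = (m1, m2) = two smallest right endpoints among segments of length L
def pvStep (d : PySem.Dict Int (Int × Option Int)) (s : List Int) :
    PySem.Dict Int (Int × Option Int) :=
  match d.get? (pvB s - pvA s) with
  | none => d.insert (pvB s - pvA s) (pvB s, none)
  | some (m1, m2) =>
    if pvB s < m1 then d.insert (pvB s - pvA s) (pvB s, some m1)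
    else
      match m2 with
      | none => d.insert (pvB s - pvA s) (m1, some (pvB s))
      | some v => if pvB s < v then d.insert (pvB s - pvA s) (m1, some (pvB s)) else d

-- second pass: does some OTHER segment of complementary length end strictly left of s?
def pvCheck (d : PySem.Dict Int (Int × Option Int)) (s : List Int) : Bool :=
  match d.get? (2022 - (pvB s - pvA s)) with
  | none => false
  | some (m1, m2) =>
    match (if pvB s - pvA s = 1011 ∧ pvB s = m1 then m2 else some m1) with
    | none => false
    | some v => decide (v < pvA s)

def odcinki_alt (T : List (List Int)) : Bool :=
  T.any (pvCheck (T.foldl pvStep PySem.Dict.empty))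

-- ===== PRECONDITION & SPEC =====
-- Pre_ excludes inputs with a row of fewer than 2 entries: there A raises IndexError as soon as
-- two rows exist, and B (which indexes every row up front) raises on them too; with a single
-- short row A happens to return False without ever indexing it, which B does not reproduce.
def Pre_odcinki (T : List (List Int)) : Prop := ∀ s ∈ T, 2 ≤ s.length
instance (T : List (List Int)) : Decidable (Pre_odcinki T) := by unfold Pre_odcinki; infer_instance
def pvWitness_odcinki : List (List Int) := [[0, 1011], [2000, 3011]]

def Spec_odcinki (T : List (List Int)) (out : Bool) : Prop := out = odcinki_alt T
instance (T : List (List Int)) (out : Bool) : Decidable (Spec_odcinki T out) := by unfold Spec_odcinki; infer_instance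

-- ===== CLAIM (what is proved, stated in full; the proofs are below) =====
def Claim_equal_odcinki : Prop := ∀ (T : List (List Int)), Dom_odcinki T → Pre_odcinki T → Spec_odcinki T (odcinki T)

-- ===== LEMMAS AND PROOFS =====

-- the length of a segment and the right endpoints of the segments of a given length
def pvLen (s : List Int) : Int := pvB s - pvA s
def bsOf (T : List (List Int)) (K : Int) : List Int :=
  (T.filter (fun s => pvLen s == K)).map pvB

-- pvStep's per-key update, as a function on the stored entry
def tsStep (e : Option (Int × Option Int)) (b : Int) : Option (Int × Option Int) :=
  match e with
  | none => some (b, none)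
  | some (m1, m2) =>
    if b < m1 then some (b, some m1)
    else
      match m2 with
      | none => some (m1, some b)
      | some v => if b < v then some (m1, some b) else some (m1, some v)

theorem bsOf_append (T : List (List Int)) (s : List Int) (K : Int) :
    bsOf (T ++ [s]) K = bsOf T K ++ (if pvLen s = K then [pvB s] else []) := by
  simp [bsOf, List.filter_append]
  split_ifs with h <;> simp [h]

theorem get?_pvStep (d : PySem.Dict Int (Int × Option Int)) (s : List Int) (K : Int) :
    (pvStep d s).get? K =
      if K = pvB s - pvA s then tsStep (d.get? (pvB s - pvA s)) (pvB s) else d.get? K := by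
  unfold pvStep
  cases h : d.get? (pvB s - pvA s) with
  | none => simp [PySem.Dict.get?_insert, tsStep]
  | some e =>
    obtain ⟨m1, m2⟩ := e
    rcases m2 with _ | v
    · by_cases hb : pvB s < m1 <;> simp [hb, PySem.Dict.get?_insert, tsStep]
    · by_cases hb : pvB s < m1
      · simp [hb, PySem.Dict.get?_insert, tsStep]
      · by_cases hv : pvB s < v <;>
          [skip; split_ifs with hKk] <;>
          simp [PySem.Dict.get?_insert, tsStep, *]

-- after the first pass, the dict stores, per length K, the fold of tsStep over that group
theorem dict_char (T : List (List Int)) (K : Int) :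
    (T.foldl pvStep PySem.Dict.empty).get? K = (bsOf T K).foldl tsStep none := by
  induction T using List.reverseRecOn with
  | nil => simp [bsOf, PySem.Dict.get?_empty]
  | append_singleton T s ih =>
    rw [List.foldl_append, bsOf_append, List.foldl_append, List.foldl_cons, List.foldl_nil,
      get?_pvStep]
    by_cases hK : pvLen s = K
    · have hK2 : K = pvB s - pvA s := hK.symm
      rw [if_pos hK, if_pos hK2, ← hK2, ih]
      simp
    · have hK2 : ¬ (K = pvB s - pvA s) := fun h' => hK h'.symm
      rw [if_neg hK, if_neg hK2, ih]
      simp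

-- invariant: the stored entry is (minimum, minimum of the rest) of the processed values
def InvTS (G : List Int) (e : Option (Int × Option Int)) : Prop :=
  match e with
  | none => G = []
  | some (m1, m2) =>
    m1 ∈ G ∧ (∀ x ∈ G, m1 ≤ x) ∧
      (match m2 with
       | none => G.erase m1 = []
       | some v => v ∈ G.erase m1 ∧ ∀ x ∈ G.erase m1, v ≤ x)

theorem invTS (G : List Int) : InvTS G (G.foldl tsStep none) := by
  induction G using List.reverseRecOn with
  | nil => simp [InvTS]
  | append_singleton G b ih =>
    rw [List.foldl_append, List.foldl_cons, List.foldl_nil]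
    cases h : G.foldl tsStep none with
    | none =>
      rw [h] at ih; simp only [InvTS] at ih; subst ih
      simp [tsStep, InvTS]
    | some e =>
      obtain ⟨m1, m2⟩ := e
      rw [h] at ih; simp only [InvTS] at ih
      obtain ⟨hm, hmin, hrest⟩ := ih
      by_cases hb : b < m1
      · -- new minimum; b ∉ G since b < m1 ≤ all of G
        have hbG : b ∉ G := fun hin => absurd (hmin b hin) (by omega)
        simp only [tsStep, if_pos hb, InvTS]
        refine ⟨by simp, ?_, ?_⟩
        · intro x hx
          rcases List.mem_append.mp hx with hx | hx
          · exact le_trans (le_of_lt hb) (hmin x hx)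
          · simp at hx; omega
        · rw [List.erase_append_right _ hbG]
          simp
          exact ⟨hm, hmin⟩
      · rcases m2 with _ | v
        · simp only [tsStep, if_neg hb, InvTS]
          refine ⟨List.mem_append_left _ hm, ?_, ?_⟩
          · intro x hx
            rcases List.mem_append.mp hx with hx | hx
            · exact hmin x hx
            · simp at hx; omega
          · rw [List.erase_append_left _ hm, hrest]
            simp
        · obtain ⟨hv, hvmin⟩ := hrest
          by_cases hbv : b < v
          · simp only [tsStep, if_neg hb, if_pos hbv, InvTS]
            refine ⟨List.mem_append_left _ hm, ?_, ?_⟩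
            · intro x hx
              rcases List.mem_append.mp hx with hx | hx
              · exact hmin x hx
              · simp at hx; omega
            · rw [List.erase_append_left _ hm]
              constructor
              · simp
              · intro x hx
                rcases List.mem_append.mp hx with hx | hx
                · exact le_trans (le_of_lt hbv) (hvmin x hx)
                · simp at hx; omega
          · simp only [tsStep, if_neg hb, if_neg hbv, InvTS]
            refine ⟨List.mem_append_left _ hm, ?_, ?_⟩
            · intro x hx
              rcases List.mem_append.mp hx with hx | hx
              · exact hmin x hx
              · simp at hx; omega
            · rw [List.erase_append_left _ hm]
              constructor
              · exact List.mem_append_left _ hv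
              · intro x hx
                rcases List.mem_append.mp hx with hx | hx
                · exact hvmin x hx
                · simp at hx; omega

theorem query_all (G : List Int) (a : Int) :
    (∃ y ∈ G, y < a) ↔
      (∃ m1 m2, G.foldl tsStep none = some (m1, m2) ∧ m1 < a) := by
  have h := invTS G
  cases he : G.foldl tsStep none with
  | none => rw [he] at h; simp only [InvTS] at h; subst h; simp
  | some e =>
    obtain ⟨m1, m2⟩ := e
    rw [he] at h; simp only [InvTS] at h
    obtain ⟨hm, hmin, _⟩ := h
    constructor
    · rintro ⟨y, hy, hya⟩
      exact ⟨m1, m2, rfl, lt_of_le_of_lt (hmin y hy) hya⟩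
    · rintro ⟨m1', m2', he', hlt⟩
      simp only [Option.some.injEq, Prod.mk.injEq] at he'
      obtain ⟨rfl, rfl⟩ := he'
      exact ⟨m1, hm, hlt⟩

theorem query_erase (G : List Int) (b a : Int) (hb : b ∈ G) :
    (∃ y ∈ G.erase b, y < a) ↔
      (∃ m1 m2, G.foldl tsStep none = some (m1, m2) ∧
        (if b = m1 then (∃ v, m2 = some v ∧ v < a) else m1 < a)) := by
  have h := invTS G
  cases he : G.foldl tsStep none with
  | none => rw [he] at h; simp only [InvTS] at h; subst h; simp at hb
  | some e =>
    obtain ⟨m1, m2⟩ := e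
    rw [he] at h; simp only [InvTS] at h
    obtain ⟨hm, hmin, hrest⟩ := h
    constructor
    · rintro ⟨y, hy, hya⟩
      refine ⟨m1, m2, rfl, ?_⟩
      by_cases hbm : b = m1
      · subst hbm
        rcases m2 with _ | v
        · rw [hrest] at hy; simp at hy
        · obtain ⟨hv, hvmin⟩ := hrest
          simp only [if_pos rfl]
          exact ⟨v, rfl, lt_of_le_of_lt (hvmin y hy) hya⟩
      · rw [if_neg hbm]
        exact lt_of_le_of_lt (hmin y (List.mem_of_mem_erase hy)) hya
    · rintro ⟨m1', m2', he', hcond⟩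
      simp only [Option.some.injEq, Prod.mk.injEq] at he'
      obtain ⟨rfl, rfl⟩ := he'
      by_cases hbm : b = m1
      · rw [if_pos hbm] at hcond
        obtain ⟨v, rfl, hva⟩ := hcond
        obtain ⟨hv, _⟩ := hrest
        subst hbm
        exact ⟨v, hv, hva⟩
      · rw [if_neg hbm] at hcond
        exact ⟨m1, (List.mem_erase_of_ne (Ne.symm hbm)).mpr hm, hcond⟩

theorem mem_bsOf (T : List (List Int)) (K y : Int) :
    y ∈ bsOf T K ↔ ∃ s ∈ T, pvLen s = K ∧ pvB s = y := by
  simp [bsOf]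
  constructor
  · rintro ⟨s, ⟨hs, hk⟩, rfl⟩; exact ⟨s, hs, hk, rfl⟩
  · rintro ⟨s, hs, hk, rfl⟩; exact ⟨s, ⟨hs, hk⟩, rfl⟩

theorem perm_cons_eraseIdx (T : List (List Int)) (i : Nat) (hi : i < T.length) :
    T.Perm (T[i] :: T.eraseIdx i) :=
  (List.perm_cons_erase (List.getElem_mem hi)).trans
    ((List.erase_getElem hi).cons T[i])

theorem bsOf_eraseIdx_perm (T : List (List Int)) (i : Nat) (hi : i < T.length) (K : Int) :
    (bsOf T K).Perm
      ((if pvLen T[i] = K then [pvB T[i]] else []) ++ bsOf (T.eraseIdx i) K) := by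
  have h := ((perm_cons_eraseIdx T i hi).filter (fun s => pvLen s == K)).map pvB
  refine h.trans ?_
  simp only [List.filter_cons]
  by_cases hK : pvLen T[i] = K
  · simp [hK, bsOf]
  · simp [hK, bsOf]

theorem mem_H_iff (T : List (List Int)) (i : Nat) (K a : Int) :
    (∃ y ∈ bsOf (T.eraseIdx i) K, y < a) ↔
      (∃ j, ∃ hj : j < T.length, j ≠ i ∧ pvLen T[j] = K ∧ pvB T[j] < a) := by
  constructor
  · rintro ⟨y, hy, hya⟩
    obtain ⟨s, hs, hk, rfl⟩ := (mem_bsOf _ K y).mp hy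
    obtain ⟨j, hj, hne, rfl⟩ := List.mem_eraseIdx_iff_getElem.mp hs
    exact ⟨j, hj, hne, hk, hya⟩
  · rintro ⟨j, hj, hne, hk, hlt⟩
    refine ⟨pvB T[j], (mem_bsOf _ K _).mpr ⟨T[j], ?_, hk, rfl⟩, hlt⟩
    exact List.mem_eraseIdx_iff_getElem.mpr ⟨j, hj, hne, rfl⟩

-- pvCheck at T[i] answers: is there a DIFFERENT index j with the complementary length
-- whose right endpoint lies strictly left of T[i]'s left endpoint?
theorem check_char (T : List (List Int)) (i : Nat) (hi : i < T.length) :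
    pvCheck (T.foldl pvStep PySem.Dict.empty) T[i] = true ↔
      (∃ j, ∃ hj : j < T.length, j ≠ i ∧
        pvLen T[j] = 2022 - pvLen T[i] ∧ pvB T[j] < pvA T[i]) := by
  rw [← mem_H_iff T i]
  set s := T[i] with hs
  set M : Int := 2022 - pvLen s with hM
  have hdict : (T.foldl pvStep PySem.Dict.empty).get? (2022 - (pvB s - pvA s)) =
      (bsOf T M).foldl tsStep none := dict_char T M
  by_cases h1011 : pvLen s = 1011
  · -- s itself belongs to the queried group: discount one copy of its own right endpoint
    have hMM : M = pvLen s := by rw [hM]; omega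
    have hbG : pvB s ∈ bsOf T M :=
      (mem_bsOf T M _).mpr ⟨s, by rw [hs]; exact List.getElem_mem hi, hMM.symm, rfl⟩
    have hperm := bsOf_eraseIdx_perm T i hi M
    rw [if_pos (hs ▸ hMM.symm)] at hperm
    rw [← hs] at hperm
    have herase : (bsOf (T.eraseIdx i) M).Perm ((bsOf T M).erase (pvB s)) := by
      have := hperm.erase (pvB s)
      simp only [List.singleton_append, List.erase_cons_head] at this
      exact this.symm
    have key : (∃ y ∈ bsOf (T.eraseIdx i) M, y < pvA s) ↔
        (∃ y ∈ (bsOf T M).erase (pvB s), y < pvA s) := by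
      constructor <;> rintro ⟨y, hy, hya⟩
      · exact ⟨y, herase.mem_iff.mp hy, hya⟩
      · exact ⟨y, herase.mem_iff.mpr hy, hya⟩
    rw [key, query_erase _ _ _ hbG]
    unfold pvCheck
    rw [hdict]
    cases he : (bsOf T M).foldl tsStep none with
    | none => simp
    | some e =>
      obtain ⟨m1, m2⟩ := e
      have hcond : pvB s - pvA s = 1011 := h1011
      by_cases hbm : pvB s = m1
      · subst hbm
        rcases m2 with _ | v <;> simp [hcond]
      · simp [hcond, hbm]
  · -- s is not in the queried group: its minimum alone decides
    have hMne : ¬ (pvLen s = M) := by rw [hM]; omega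
    have hperm := bsOf_eraseIdx_perm T i hi M
    rw [if_neg (hs ▸ hMne)] at hperm
    simp only [List.nil_append] at hperm
    have key : (∃ y ∈ bsOf (T.eraseIdx i) M, y < pvA s) ↔
        (∃ y ∈ bsOf T M, y < pvA s) := by
      constructor <;> rintro ⟨y, hy, hya⟩
      · exact ⟨y, hperm.mem_iff.mpr hy, hya⟩
      · exact ⟨y, hperm.mem_iff.mp hy, hya⟩
    rw [key, query_all]
    unfold pvCheck
    rw [hdict]
    cases he : (bsOf T M).foldl tsStep none with
    | none => simp
    | some e =>
      obtain ⟨m1, m2⟩ := e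
      have hcond : ¬ (pvB s - pvA s = 1011 ∧ pvB s = m1) :=
        fun h => h1011 h.1
      simp [hcond]

theorem alt_char (T : List (List Int)) :
    odcinki_alt T = true ↔
      (∃ i, ∃ hi : i < T.length, ∃ j, ∃ hj : j < T.length, j ≠ i ∧
        pvLen T[j] = 2022 - pvLen T[i] ∧ pvB T[j] < pvA T[i]) := by
  simp only [odcinki_alt, List.any_eq_true]
  constructor
  · rintro ⟨s, hs, h⟩
    obtain ⟨i, hi, rfl⟩ := List.mem_iff_getElem.mp hs
    exact ⟨i, hi, (check_char T i hi).mp h⟩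
  · rintro ⟨i, hi, h⟩
    exact ⟨T[i], List.getElem_mem hi, (check_char T i hi).mpr h⟩

theorem a_char (T : List (List Int)) :
    odcinki T = true ↔
      (∃ i, ∃ hi : i < T.length, ∃ j, ∃ hj : j < T.length, i ≠ j ∧
        (pvA T[i] > pvB T[j] ∨ pvB T[i] < pvA T[j]) ∧
        pvLen T[i] + pvLen T[j] = 2022) := by
  simp only [odcinki, List.any_eq_true, List.mem_range, Bool.and_eq_true, Bool.or_eq_true,
    decide_eq_true_eq, pvLen]
  constructor
  · rintro ⟨i, hi, j, hj, hne, hd, hsum⟩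
    rw [List.getD_eq_getElem T [] hi, List.getD_eq_getElem T [] hj] at hd hsum
    exact ⟨i, hi, j, hj, hne, hd, hsum⟩
  · rintro ⟨i, hi, j, hj, hne, hd, hsum⟩
    refine ⟨i, hi, j, hj, hne, ?_, ?_⟩ <;>
      rw [List.getD_eq_getElem T [] hi, List.getD_eq_getElem T [] hj] <;> [exact hd; exact hsum]

-- ===== VERDICT (by name: the statement is the Claim_ definition above) =====
theorem odcinki_spec : Claim_equal_odcinki := by
  intro T _ _
  unfold Spec_odcinki
  rw [Bool.eq_iff_iff, a_char, alt_char]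
  constructor
  · rintro ⟨i, hi, j, hj, hij, hdisj, hsum⟩
    rcases hdisj with h | h
    · exact ⟨i, hi, j, hj, Ne.symm hij, by omega, h⟩
    · exact ⟨j, hj, i, hi, hij, by omega, h⟩
  · rintro ⟨i, hi, j, hj, hij, hlen, hlt⟩
    exact ⟨i, hi, j, hj, Ne.symm hij, Or.inl hlt, by omega⟩
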